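-- pv_equiv track=rewrite | github.com/ikramawol/A2SV_G5 | python track/distance-between-bus-stops.py | distanceBetweenBusStops
-- ===== SOURCE A (Python) =====
-- def distanceBetweenBusStops(distance, start, destination):
--     """
--     :type distance: List[int]
--     :type start: int
--     :type destination: int
--     :rtype: int
--     """
--     n = len(distance)
--     cw_dir = 0
--     ccw_dir = 0
--
--     i = start
--     while i != destination:
--         cw_dir += distance[i]
--         i = (i + 1) % n
--
--     i = start
--     while i != destination:
--         i = (i - 1 + n) % n
--         ccw_dir += distance[i]
--
--     return min(cw_dir, ccw_dir)
-- ===== SOURCE B (Python) =====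
-- def distanceBetweenBusStops(distance, start, destination):
--     if start == destination:
--         return 0
--     lo = min(start, destination)
--     hi = max(start, destination)
--     seg = sum(distance[lo:hi])
--     return min(seg, sum(distance) - seg)
-- ===== Notes on version B (the rewrite author's own statement) =====
-- stated objective: simpler
-- what changed: Both modular index-walking while-loops are replaced by one slice sum: the arc between min and max of the two stops is summed once and the other arc is obtained by subtracting from the total, using min's symmetry in direction; the measured speedup is a constant factor from C-level sum/slicing versus per-element interpreted loops.
-- outside the precondition, e.g. on distanceBetweenBusStops([3, 4], -1, 0): A returns 3, B returns 0
import Mathlib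
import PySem

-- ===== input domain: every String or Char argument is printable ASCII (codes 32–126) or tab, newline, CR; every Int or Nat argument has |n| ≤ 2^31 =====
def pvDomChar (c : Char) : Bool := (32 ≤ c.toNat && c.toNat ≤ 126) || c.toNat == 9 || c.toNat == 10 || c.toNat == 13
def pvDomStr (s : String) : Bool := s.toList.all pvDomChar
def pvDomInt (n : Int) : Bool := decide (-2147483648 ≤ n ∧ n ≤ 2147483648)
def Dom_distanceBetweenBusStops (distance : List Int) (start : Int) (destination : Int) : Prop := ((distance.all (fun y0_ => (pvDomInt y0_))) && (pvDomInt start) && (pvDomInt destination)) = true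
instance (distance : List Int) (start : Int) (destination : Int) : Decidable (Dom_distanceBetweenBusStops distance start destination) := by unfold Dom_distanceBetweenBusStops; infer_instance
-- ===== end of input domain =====

-- B replaces A's two modular index-walking while-loops by one slice sum plus the total
-- (the other arc is the total minus the slice); objective: simpler.


-- ===== PORT A =====
-- 'while i != destination: cw_dir += distance[i]; i = (i+1) % n' as fuel-bounded recursion.
-- Inside Pre_ the walk reaches destination in at most n-1 steps, so fuel = distance.length
-- suffices; pyGetD's default 0 is never read inside Pre_ (indices stay in range there).
def pvCwGo (distance : List Int) (n destination : Int) : Nat → Int → Int → Int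
  | 0, _, acc => acc
  | fuel + 1, i, acc =>
      if i = destination then acc
      else pvCwGo distance n destination fuel (PySem.Int.mod (i + 1) n)
             (acc + PySem.List.pyGetD distance i 0)

-- 'while i != destination: i = (i-1+n) % n; ccw_dir += distance[i]'
def pvCcwGo (distance : List Int) (n destination : Int) : Nat → Int → Int → Int
  | 0, _, acc => acc
  | fuel + 1, i, acc =>
      if i = destination then acc
      else
        pvCcwGo distance n destination fuel (PySem.Int.mod (i - 1 + n) n)
          (acc + PySem.List.pyGetD distance (PySem.Int.mod (i - 1 + n) n) 0)

def distanceBetweenBusStops (distance : List Int) (start : Int) (destination : Int) : Int :=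
  let n : Int := distance.length
  let cw := pvCwGo distance n destination distance.length start 0
  let ccw := pvCcwGo distance n destination distance.length start 0
  min cw ccw

-- ===== PORT B =====
def distanceBetweenBusStops_alt (distance : List Int) (start : Int) (destination : Int) : Int :=
  if start = destination then 0
  else
    let lo := min start destination
    let hi := max start destination
    let seg := (PySem.List.slice distance (some lo) (some hi)).sum
    min seg (distance.sum - seg)

-- ===== PRECONDITION & SPEC =====
-- Pre_ restricts start and destination to the function's natural domain: valid stop indices
-- 0 ≤ i < len(distance) (or start == destination, where A returns 0 at once for any indices).
-- Outside it A raises IndexError, loops forever, or (for a negative start in [-n,0)) returns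
-- a value produced by Python's negative-index wraparound, outside the task's natural domain.
def Pre_distanceBetweenBusStops (distance : List Int) (start : Int) (destination : Int) : Prop :=
  start = destination ∨
    (0 ≤ start ∧ start < distance.length ∧ 0 ≤ destination ∧ destination < distance.length)
instance (distance : List Int) (start : Int) (destination : Int) : Decidable (Pre_distanceBetweenBusStops distance start destination) := by unfold Pre_distanceBetweenBusStops; infer_instance

def pvWitness_distanceBetweenBusStops : List Int × Int × Int := ([3, 1, 4, 2], 0, 2)

def Spec_distanceBetweenBusStops (distance : List Int) (start : Int) (destination : Int) (out : Int) : Prop := out = distanceBetweenBusStops_alt distance start destination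
instance (distance : List Int) (start : Int) (destination : Int) (out : Int) : Decidable (Spec_distanceBetweenBusStops distance start destination out) := by unfold Spec_distanceBetweenBusStops; infer_instance

-- ===== CLAIM (what is proved, stated in full; the proofs are below) =====
def Claim_equal_distanceBetweenBusStops : Prop := ∀ (distance : List Int) (start : Int) (destination : Int), Dom_distanceBetweenBusStops distance start destination → Pre_distanceBetweenBusStops distance start destination → Spec_distanceBetweenBusStops distance start destination (distanceBetweenBusStops distance start destination)

-- ===== LEMMAS AND PROOFS =====

-- sum of distance[a:b] for Nat bounds
def sliceSum (xs : List Int) (a b : Nat) : Int := ((xs.drop a).take (b - a)).sum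

theorem sliceSum_self (xs : List Int) (a : Nat) : sliceSum xs a a = 0 := by
  simp [sliceSum]

theorem sliceSum_left (xs : List Int) {a b : Nat} (hab : a < b) (hb : a < xs.length) :
    sliceSum xs a b = xs.getD a 0 + sliceSum xs (a + 1) b := by
  unfold sliceSum
  rw [List.drop_eq_getElem_cons hb]
  have : b - a = (b - (a + 1)) + 1 := by omega
  rw [this, List.take_succ_cons, List.sum_cons, List.getD_eq_getElem xs 0 hb]

theorem sliceSum_split (xs : List Int) {a b c : Nat} (hab : a ≤ b) (hbc : b ≤ c) :
    sliceSum xs a c = sliceSum xs a b + sliceSum xs b c := by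
  unfold sliceSum
  have h : c - a = (b - a) + (c - b) := by omega
  rw [h, List.take_add, List.sum_append, List.drop_drop]
  have h2 : a + (b - a) = b := by omega
  rw [h2]

theorem sliceSum_all (xs : List Int) : sliceSum xs 0 xs.length = xs.sum := by
  simp [sliceSum]

theorem sliceSum_right (xs : List Int) {a b : Nat} (hab : a ≤ b) (hb : b < xs.length) :
    sliceSum xs a (b + 1) = sliceSum xs a b + xs.getD b 0 := by
  rw [sliceSum_split xs hab (Nat.le_succ b),
      sliceSum_left xs (Nat.lt_succ_self b) hb, sliceSum_self]
  ring

-- the value the clockwise loop adds, as a function of the current index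
def segS (xs : List Int) (i d : Nat) : Int :=
  if i ≤ d then sliceSum xs i d else xs.sum - sliceSum xs d i

theorem cw_inv (xs : List Int) (d : Nat) (hd : d < xs.length) :
    ∀ (fuel : Nat) (i : Nat) (acc : Int), i < xs.length →
      (if i ≤ d then d - i else d + xs.length - i) ≤ fuel →
      pvCwGo xs (xs.length : Int) (d : Int) fuel (i : Int) acc = acc + segS xs i d := by
  intro fuel
  induction fuel with
  | zero =>
      intro i acc hi hfuel
      have : i = d := by split at hfuel <;> omega
      subst this
      simp [pvCwGo, segS, sliceSum_self]
  | succ fuel ih =>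
      intro i acc hi hfuel
      by_cases hid : i = d
      · subst hid; simp [pvCwGo, segS, sliceSum_self]
      · have hne : (i : Int) ≠ (d : Int) := by exact_mod_cast hid
        have hstep : PySem.Int.mod ((i : Int) + 1) (xs.length : Int)
            = (((i + 1) % xs.length : Nat) : Int) := by
          exact_mod_cast PySem.Int.mod_natCast (i + 1) xs.length
        rw [pvCwGo, if_neg hne, hstep, PySem.List.pyGetD_natCast]
        by_cases hn : i + 1 = xs.length
        · have h0 : (i + 1) % xs.length = 0 := by rw [hn, Nat.mod_self]
          rw [h0]
          have hid' : d < i := by omega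
          rw [if_neg (by omega : ¬ i ≤ d)] at hfuel
          rw [ih 0 _ (by omega) (by rw [if_pos (Nat.zero_le d)]; omega)]
          -- segS i d = xs[i] + segS 0 d  when i = len-1 > d
          have hT : xs.sum = sliceSum xs 0 d + sliceSum xs d i + xs.getD i 0 := by
            rw [← sliceSum_all xs, show xs.length = i + 1 from hn.symm,
                sliceSum_split xs (Nat.zero_le d) (by omega : d ≤ i + 1),
                sliceSum_right xs (le_of_lt hid') hi]
            ring
          simp only [segS, if_neg (by omega : ¬ i ≤ d), if_pos (Nat.zero_le d)]
          rw [hT]; ring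
        · have hlt : i + 1 < xs.length := by omega
          rw [Nat.mod_eq_of_lt hlt]
          have hfx : (if i + 1 ≤ d then d - (i + 1) else d + xs.length - (i + 1)) ≤ fuel := by
            by_cases h : i ≤ d
            · rw [if_pos h] at hfuel; rw [if_pos (by omega)]; omega
            · rw [if_neg h] at hfuel; rw [if_neg (by omega)]; omega
          rw [ih (i + 1) _ hlt hfx]
          by_cases hle : i < d
          · simp only [segS, if_pos (le_of_lt hle), if_pos (by omega : i + 1 ≤ d)]
            rw [sliceSum_left xs hle hi]; ring
          · have hgt : d < i := by omega
            simp only [segS, if_neg (by omega : ¬ i ≤ d), if_neg (by omega : ¬ i + 1 ≤ d)]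
            rw [sliceSum_right xs (le_of_lt hgt) hi]; ring

theorem ccw_inv (xs : List Int) (d : Nat) (hd : d < xs.length) :
    ∀ (fuel : Nat) (i : Nat) (acc : Int), i < xs.length → i ≠ d →
      (if d < i then i - d else i + xs.length - d) ≤ fuel →
      pvCcwGo xs (xs.length : Int) (d : Int) fuel (i : Int) acc
        = acc + (xs.sum - segS xs i d) := by
  intro fuel
  induction fuel with
  | zero =>
      intro i acc hi hid hfuel
      split at hfuel <;> omega
  | succ fuel ih =>
      intro i acc hi hid hfuel
      have hne : (i : Int) ≠ (d : Int) := by exact_mod_cast hid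
      -- the stepped index (i - 1 + n) % n as a Nat
      have hstep : PySem.Int.mod ((i : Int) - 1 + (xs.length : Int)) (xs.length : Int)
          = (((i + xs.length - 1) % xs.length : Nat) : Int) := by
        have : (i : Int) - 1 + (xs.length : Int) = ((i + xs.length - 1 : Nat) : Int) := by
          omega
        rw [this]
        exact_mod_cast PySem.Int.mod_natCast (i + xs.length - 1) xs.length
      set i' : Nat := (i + xs.length - 1) % xs.length with hi'
      have hi'eq : i' = if i = 0 then xs.length - 1 else i - 1 := by
        by_cases h0 : i = 0
        · rw [hi', if_pos h0, h0, Nat.zero_add,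
              Nat.mod_eq_of_lt (show xs.length - 1 < xs.length by omega)]
        · rw [hi', if_neg h0, show i + xs.length - 1 = (i - 1) + 1 * xs.length by omega,
              Nat.add_mul_mod_self_right, Nat.mod_eq_of_lt (by omega)]
      have hi'lt : i' < xs.length := by rw [hi'eq]; split <;> omega
      rw [pvCcwGo, if_neg hne, hstep, PySem.List.pyGetD_natCast]
      by_cases hdone : i' = d
      · -- next index is the destination: the loop then stops
        have hstop : pvCcwGo xs (xs.length : Int) (d : Int) fuel ((i' : Nat) : Int)
            (acc + xs.getD i' 0) = acc + xs.getD i' 0 := by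
          cases fuel <;> simp [pvCcwGo, hdone]
        rw [hstop, hdone]
        -- need: xs.sum - segS i d = xs[d]
        rcases (by rw [hi'eq] at hdone; split at hdone <;> omega :
            (i = 0 ∧ d = xs.length - 1) ∨ i = d + 1) with ⟨h0, hdl⟩ | hsucc
        · subst h0
          have hT : xs.sum = sliceSum xs 0 d + xs.getD d 0 := by
            rw [← sliceSum_all xs, show xs.length = d + 1 by omega,
                sliceSum_right xs (Nat.zero_le d) hd]
          simp only [segS, if_pos (Nat.zero_le d)]
          rw [hT]; ring
        · subst hsucc
          simp only [segS, if_neg (by omega : ¬ d + 1 ≤ d)]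
          rw [sliceSum_right xs (le_refl d) hd, sliceSum_self]; ring
      · have hfuel' : (if d < i' then i' - d else i' + xs.length - d) ≤ fuel := by
          rw [hi'eq] at hdone ⊢
          by_cases h0 : i = 0
          · rw [if_neg (by omega : ¬ d < i)] at hfuel
            rw [if_pos h0] at hdone ⊢
            rw [if_pos (by omega : d < xs.length - 1)]
            omega
          · rw [if_neg h0] at hdone ⊢
            by_cases h : d < i
            · rw [if_pos h] at hfuel
              rw [if_pos (by omega : d < i - 1)]
              omega
            · rw [if_neg h] at hfuel
              rw [if_neg (by omega : ¬ d < i - 1)]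
              omega
        rw [ih i' _ hi'lt hdone hfuel']
        -- need: segS i' d = segS i d + xs[i']
        have key : segS xs i' d = segS xs i d + xs.getD i' 0 := by
          by_cases h0 : i = 0
          · subst h0
            have hie : i' = xs.length - 1 := by rw [hi'eq]; rfl
            have hdlt : d < i' := by rw [hi'eq] at hdone; omega
            have hT : xs.sum = sliceSum xs 0 d + sliceSum xs d i' + xs.getD i' 0 := by
              rw [← sliceSum_all xs, show xs.length = i' + 1 by omega,
                  sliceSum_split xs (Nat.zero_le d) (by omega : d ≤ i' + 1),
                  sliceSum_right xs (le_of_lt hdlt) (by omega)]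
              ring
            simp only [segS, if_pos (Nat.zero_le d), if_neg (by omega : ¬ i' ≤ d)]
            rw [hT]; ring
          · obtain ⟨j, rfl⟩ : ∃ j, i = j + 1 := ⟨i - 1, by omega⟩
            have hie : i' = j := by rw [hi'eq, if_neg h0]; omega
            rw [hie]
            have hjd : j ≠ d := by rw [hie] at hdone; exact hdone
            by_cases h : j + 1 ≤ d
            · -- walking down on the left of d
              simp only [segS, if_pos (by omega : j ≤ d), if_pos h]
              rw [sliceSum_left xs (by omega : j < d) (by omega)]; ring
            · have hgt : d < j := by omega
              simp only [segS, if_neg (by omega : ¬ j ≤ d), if_neg (by omega : ¬ j + 1 ≤ d)]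
              rw [sliceSum_right xs (le_of_lt hgt) (by omega)]; ring
        rw [key]; ring

-- ===== VERDICT (by name: the statement is the Claim_ definition above) =====
theorem distanceBetweenBusStops_spec : Claim_equal_distanceBetweenBusStops := by
  intro distance start destination _ hpre
  have hA : distanceBetweenBusStops distance start destination
      = min (pvCwGo distance (distance.length : Int) destination distance.length start 0)
            (pvCcwGo distance (distance.length : Int) destination distance.length start 0) := rfl
  unfold Spec_distanceBetweenBusStops
  rw [hA]
  rcases hpre with heq | ⟨hs0, hsn, hd0, hdn⟩
  · subst heq
    have hcw : pvCwGo distance (distance.length : Int) start distance.length start 0 = 0 := by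
      cases h : distance.length <;> simp [pvCwGo]
    have hccw : pvCcwGo distance (distance.length : Int) start distance.length start 0 = 0 := by
      cases h : distance.length <;> simp [pvCcwGo]
    rw [hcw, hccw]
    simp [distanceBetweenBusStops_alt]
  · -- indices in range: name them as Nats
    obtain ⟨s, rfl⟩ : ∃ s : Nat, start = (s : Int) := ⟨start.toNat, (Int.toNat_of_nonneg hs0).symm⟩
    obtain ⟨d, rfl⟩ : ∃ d : Nat, destination = (d : Int) :=
      ⟨destination.toNat, (Int.toNat_of_nonneg hd0).symm⟩
    have hs : s < distance.length := by exact_mod_cast hsn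
    have hd : d < distance.length := by exact_mod_cast hdn
    rw [cw_inv distance d hd distance.length s 0 hs (by split <;> omega)]
    by_cases hsd : s = d
    · subst hsd
      have hccw : pvCcwGo distance (distance.length : Int) (s : Int) distance.length (s : Int) 0
          = 0 := by
        cases h : distance.length <;> simp [pvCcwGo]
      rw [hccw]
      simp [distanceBetweenBusStops_alt, segS, sliceSum_self]
    · have hsdI : (s : Int) ≠ (d : Int) := by exact_mod_cast hsd
      rw [ccw_inv distance d hd distance.length s 0 hs hsd (by split <;> omega)]
      have hB : distanceBetweenBusStops_alt distance (s : Int) (d : Int)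
          = min ((PySem.List.slice distance (some (min (s : Int) (d : Int)))
                    (some (max (s : Int) (d : Int)))).sum)
                (distance.sum - (PySem.List.slice distance (some (min (s : Int) (d : Int)))
                    (some (max (s : Int) (d : Int)))).sum) := by
        rw [distanceBetweenBusStops_alt, if_neg hsdI]
      rw [hB]
      by_cases h : s < d
      · rw [show min (s : Int) (d : Int) = (s : Int) by omega,
            show max (s : Int) (d : Int) = (d : Int) by omega, PySem.List.slice_natCast]
        simp only [segS, if_pos (le_of_lt h)]
        have hseg : ((distance.drop s).take (d - s)).sum = sliceSum distance s d := rfl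
        rw [hseg]
        ring_nf
      · have hds : d < s := by omega
        rw [show min (s : Int) (d : Int) = (d : Int) by omega,
            show max (s : Int) (d : Int) = (s : Int) by omega, PySem.List.slice_natCast]
        simp only [segS, if_neg (by omega : ¬ s ≤ d)]
        have hseg : ((distance.drop d).take (s - d)).sum = sliceSum distance d s := rfl
        rw [hseg,
            show (0 : Int) + (distance.sum - sliceSum distance d s)
              = distance.sum - sliceSum distance d s by ring,
            show (0 : Int) + (distance.sum - (distance.sum - sliceSum distance d s))
              = sliceSum distance d s by ring, min_comm]
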